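-- pv_equiv track=rewrite | github.com/intention3/curriculum-design | code/util/convert/LOUconvert2.py | LOUconvert
-- ===== SOURCE A (Python) =====
-- def LOUconvert(partition):
--     num=max(partition.values())+1
--     dic={}
--     for i in range(num):
--         dic[i]=[]
--     for key,value in partition.items():
--         dic[value].append(key)
--     return dic
-- ===== SOURCE B (Python) =====
-- def LOUconvert(partition):
--     num = max(partition.values()) + 1
--     items = list(partition.items())
--
--     def build(i):
--         if i >= num:
--             return {}
--         d = {i: [k for k, v in items if v == i]}
--         d.update(build(i + 1))
--         return d
--
--     return build(0)
-- ===== Notes on version B (the rewrite author's own statement) =====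
-- stated objective: alternative
-- what changed: Replaces A's pre-allocate-empty-buckets-then-one-append-pass fill with a recursive descent over the community indices: each recursive call builds its own bucket by a fresh filtered scan of the items and prepends it to the recursively built rest.
import Mathlib
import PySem

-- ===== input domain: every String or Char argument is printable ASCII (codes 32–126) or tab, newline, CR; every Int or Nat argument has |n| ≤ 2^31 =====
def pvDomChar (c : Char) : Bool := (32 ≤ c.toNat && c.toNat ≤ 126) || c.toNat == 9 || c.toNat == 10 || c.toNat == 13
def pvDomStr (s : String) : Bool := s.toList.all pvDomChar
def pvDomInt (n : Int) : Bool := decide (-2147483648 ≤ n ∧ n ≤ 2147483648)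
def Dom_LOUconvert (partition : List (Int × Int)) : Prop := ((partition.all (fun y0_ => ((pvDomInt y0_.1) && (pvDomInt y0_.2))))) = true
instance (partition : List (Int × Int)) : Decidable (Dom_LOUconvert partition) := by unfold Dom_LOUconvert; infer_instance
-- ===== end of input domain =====

-- B replaces A's pre-allocate-then-append fill pass by a recursive descent over the
-- community indices, each call filtering the items for its own bucket; same result,
-- proved equal on Pre_. The dict argument is received as its association list; both
-- ports read it through PySem.Dict.ofList (Python dict semantics: duplicate keys
-- overwrite, first position kept).

-- ===== PORT A =====
def LOUconvert (partition : List (Int × Int)) : List (Int × List Int) :=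
  let d := PySem.Dict.ofList partition
  -- num = max(partition.values()) + 1 ; max([]) raises ValueError (excluded by Pre_)
  match PySem.List.max? d.values (fun y => y) with
  | none => []
  | some m =>
    let num := m + 1
    -- dic = {}; for i in range(num): dic[i] = []
    let dic : PySem.Dict Int (List Int) :=
      (PySem.List.pyRange 0 num 1).foldl (fun dic i => dic.insert i []) PySem.Dict.empty
    -- for key, value in partition.items(): dic[value].append(key)
    -- (dic[value] raises KeyError when value ∉ dic — excluded by Pre_; under Pre_ the key is
    --  always present, so 'modify' with default [] is exact)
    let dic := d.items.foldl (fun dic kv => dic.modify kv.2 [] (fun l => l ++ [kv.1])) dic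
    dic.items

-- ===== PORT B =====
-- def build(i): if i >= num: return {}
--               d = {i: [k for k, v in items if v == i]}; d.update(build(i+1)); return d
def LOUbuild (items : List (Int × Int)) (num : Int) (i : Int) : List (Int × List Int) :=
  if i ≥ num then []
  else (i, (items.filter (fun kv => kv.2 == i)).map (fun kv => kv.1)) :: LOUbuild items num (i + 1)
termination_by (num - i).toNat
decreasing_by omega

def LOUconvert_alt (partition : List (Int × Int)) : List (Int × List Int) :=
  let items := (PySem.Dict.ofList partition).items
  match PySem.List.max? (items.map (fun kv => kv.2)) (fun y => y) with
  | none => []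
  | some m => LOUbuild items (m + 1) 0

-- ===== PRECONDITION & SPEC =====
-- Pre_ excludes exactly the inputs where A raises: the empty dict (ValueError from max)
-- and dicts with a negative community value (KeyError from dic[value]).
def Pre_LOUconvert (partition : List (Int × Int)) : Prop :=
  partition ≠ [] ∧ ∀ v ∈ (PySem.Dict.ofList partition).values, 0 ≤ v
instance (partition : List (Int × Int)) : Decidable (Pre_LOUconvert partition) := by
  unfold Pre_LOUconvert; infer_instance
def pvWitness_LOUconvert : (List (Int × Int)) := [(10, 0), (20, 1), (30, 0)]

def Spec_LOUconvert (partition : List (Int × Int)) (out : List (Int × List Int)) : Prop := out = LOUconvert_alt partition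
instance (partition : List (Int × Int)) (out : List (Int × List Int)) : Decidable (Spec_LOUconvert partition out) := by unfold Spec_LOUconvert; infer_instance

-- ===== CLAIM (what is proved, stated in full; the proofs are below) =====
def Claim_equal_LOUconvert : Prop := ∀ (partition : List (Int × Int)), Dom_LOUconvert partition → Pre_LOUconvert partition → Spec_LOUconvert partition (LOUconvert partition)

-- ===== LEMMAS AND PROOFS =====

-- B's recursion unrolled into a map over the index range
lemma LOUbuild_eq_map (items : List (Int × Int)) (num i : Int) :
    LOUbuild items num i
    = (PySem.List.pyRange i num 1).map
        (fun j => (j, (items.filter (fun kv => kv.2 == j)).map (fun kv => kv.1))) := by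
  by_cases h : i ≥ num
  · rw [LOUbuild, if_pos h, PySem.List.pyRange_one_eq_nil h, List.map_nil]
  · rw [LOUbuild, if_neg h, PySem.List.pyRange_one_cons (by omega), List.map_cons,
      LOUbuild_eq_map items num (i + 1)]
termination_by (num - i).toNat
decreasing_by omega

-- the insert loop over distinct fresh keys builds one empty bucket per key
lemma items_init (R : List Int) (hR : R.Nodup) :
    (R.foldl (fun (dic : PySem.Dict Int (List Int)) i => dic.insert i []) PySem.Dict.empty).items
    = R.map (fun i => (i, ([] : List Int))) := by
  have h := PySem.Dict.items_foldl_insert_fresh R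
      (fun i => i) (fun _ => ([] : List Int)) PySem.Dict.empty
      (by intro a _; simp [PySem.Dict.contains_empty])
      (by simpa using hR)
  simpa using h

-- every bucket of the initial dict is empty (also for an absent key, where getD gives the default)
lemma getD_init (R : List Int) (hR : R.Nodup) (i : Int) :
    (R.foldl (fun (dic : PySem.Dict Int (List Int)) i => dic.insert i []) PySem.Dict.empty).getD i []
    = [] := by
  set dic0 := R.foldl (fun (dic : PySem.Dict Int (List Int)) i => dic.insert i [])
    PySem.Dict.empty with hd
  have hkeys : dic0.keys = R := by
    simp only [PySem.Dict.keys, hd, items_init R hR, List.map_map]; simp [Function.comp_def]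
  by_cases h : dic0.contains i = true
  · have hk : i ∈ dic0.keys := (PySem.Dict.contains_iff_mem_keys dic0 i).mp h
    have hmem : (i, ([] : List Int)) ∈ dic0.items := by
      rw [hd, items_init R hR]
      exact List.mem_map.mpr ⟨i, by rw [← hkeys]; exact hk, rfl⟩
    exact PySem.Dict.getD_of_mem_items dic0 hmem (by rw [hkeys]; exact hR) []
  · exact PySem.Dict.getD_of_not_contains dic0 [] (by simpa using h)

-- the fill loop, read bucket by bucket
lemma getD_fill (l : List (Int × Int)) (dic : PySem.Dict Int (List Int)) (i : Int) :
    (l.foldl (fun dic kv => dic.modify kv.2 [] (fun t => t ++ [kv.1])) dic).getD i []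
    = dic.getD i [] ++ (l.filter (fun kv => kv.2 == i)).map (fun kv => kv.1) := by
  have hswap : (l.map Prod.swap).foldl
      (fun (d : PySem.Dict Int (List Int)) p => d.modify p.1 [] (fun t => t ++ [p.2])) dic
      = l.foldl (fun dic kv => dic.modify kv.2 [] (fun t => t ++ [kv.1])) dic := by
    rw [List.foldl_map]; simp [Prod.swap]
  rw [← hswap, PySem.Dict.getD_foldl_modify_append]
  congr 1
  simp [List.filter_map, List.map_map, Function.comp_def, Prod.swap]

-- a nonempty association list yields a dict with nonempty values
lemma values_ofList_ne_nil (partition : List (Int × Int)) (h : partition ≠ []) :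
    (PySem.Dict.ofList partition).values ≠ [] := by
  have hkeys : (PySem.Dict.ofList partition).keys
      = PySem.Set.ofList (partition.map (fun kv => kv.1)) := by
    have := PySem.Dict.keys_foldl_insert_key partition (fun kv => kv.1)
      (fun _ kv => kv.2) PySem.Dict.empty
    simpa [PySem.Dict.ofList, PySem.Dict.update, PySem.Set.update_nil_left] using this
  intro hv
  have hitems : (PySem.Dict.ofList partition).items = [] := by
    simpa [PySem.Dict.values] using hv
  obtain ⟨kv, hkv⟩ := List.exists_mem_of_ne_nil partition h
  have : kv.1 ∈ (PySem.Dict.ofList partition).keys := by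
    rw [hkeys]
    exact (PySem.Set.mem_ofList _ _).mpr (List.mem_map_of_mem hkv)
  rw [PySem.Dict.keys, hitems] at this
  simp at this

-- ===== VERDICT (by name: the statement is the Claim_ definition above) =====
theorem LOUconvert_spec : Claim_equal_LOUconvert := by
  intro partition _ hpre
  obtain ⟨hne, hv⟩ := hpre
  unfold Spec_LOUconvert LOUconvert LOUconvert_alt
  set d := PySem.Dict.ofList partition with hd
  have hvals : d.items.map (fun kv => kv.2) = d.values := by
    simp [PySem.Dict.values]
  simp only [hvals]
  cases hmax : PySem.List.max? d.values (fun y => y) with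
  | none =>
    exact absurd ((PySem.List.max?_eq_none_iff _ _).mp hmax) (values_ofList_ne_nil partition hne)
  | some m =>
    simp only [hmax]
    rw [LOUbuild_eq_map]
    have hm0 : (0 : Int) ≤ m := hv m (PySem.List.max?_mem hmax)
    have hvalR : ∀ kv ∈ d.items, kv.2 ∈ PySem.List.pyRange 0 (m + 1) 1 := by
      intro kv hkv
      have h1 : kv.2 ∈ d.values := by
        simp only [PySem.Dict.values]; exact List.mem_map_of_mem hkv
      have h2 : kv.2 ≤ m := PySem.List.max?_isMax hmax kv.2 h1
      exact PySem.List.mem_pyRange_one.mpr ⟨hv kv.2 h1, by omega⟩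
    set R := PySem.List.pyRange 0 (m + 1) 1 with hR
    have hRnd : R.Nodup := PySem.List.nodup_pyRange_one 0 (m + 1)
    set dic0 := R.foldl (fun (dic : PySem.Dict Int (List Int)) i => dic.insert i [])
      PySem.Dict.empty with hdic0
    set dicF := d.items.foldl
      (fun dic kv => dic.modify kv.2 [] (fun t => t ++ [kv.1])) dic0 with hdicF
    have hkeys0 : dic0.keys = R := by
      simp only [PySem.Dict.keys, hdic0, items_init R hRnd, List.map_map]; simp [Function.comp_def]
    have hkeysF : dicF.keys = R := by
      have h := PySem.Dict.keys_foldl_modify_key d.items (fun kv => kv.2)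
        ([] : List Int) (fun _ kv t => t ++ [kv.1]) dic0
      rw [hdicF, h, hkeys0, PySem.Set.update_eq_append_filter]
      have hfil : List.filter (fun y => !PySem.Set.contains R y)
          (PySem.Set.ofList (d.items.map (fun kv => kv.2))) = [] := by
        rw [List.filter_eq_nil_iff]
        intro y hy
        have hy' : y ∈ d.items.map (fun kv => kv.2) :=
          (PySem.Set.mem_ofList _ _).mp hy
        obtain ⟨kv, hkv, rfl⟩ := List.mem_map.mp hy'
        simp [PySem.Set.contains_eq_listContains, hvalR kv hkv]
      rw [hfil, List.append_nil]
    have hnodup : dicF.keys.Nodup := by rw [hkeysF]; exact hRnd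
    rw [PySem.Dict.items_eq_map_keys dicF hnodup ([] : List Int), hkeysF]
    apply List.map_congr_left
    intro i _
    rw [hdicF, getD_fill, hdic0, getD_init R hRnd]
    simp
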